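-- pv_equiv track=rewrite | github.com/miliar/Code_Jam_Webscraper | solutions_python/Problem_155/3300.py | ovation
-- ===== SOURCE A (Python) =====
-- def ovation(maxShyness, audience):
--     audienceOvated = 0
--     audienceGroups = [int(i) for i in str(audience)]
--     audienceNeeded = 0
--     for shyLevel, newOvations in enumerate(audienceGroups):
--         if audienceOvated + audienceNeeded < shyLevel:
--             audienceNeeded += 1
--         audienceOvated += newOvations
--         if audienceOvated > maxShyness:
--             break
--     return audienceNeeded
-- ===== SOURCE B (Python) =====
-- def ovation(maxShyness, audience):
--     digits = [int(c) for c in str(audience)]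
--     prefixes = [0]
--     for d in digits:
--         prefixes.append(prefixes[-1] + d)
--     cutoff = next((i for i, p in enumerate(prefixes[1:]) if p > maxShyness),
--                   len(digits) - 1)
--     return max([0] + [i - p for i, p in enumerate(prefixes[:cutoff + 1])])
-- ===== Notes on version B (the rewrite author's own statement) =====
-- stated objective: alternative
-- what changed: A maintains a friend counter incremented inside the scanning loop; B computes the prefix-sum list, locates the first prefix exceeding maxShyness, and returns the maximum deficit index-minus-prefix over the kept prefixes (three comprehension-style phases, no mutated counter).
-- outside the precondition, e.g. on ovation(3, -42): A raises ValueError, B raises ValueError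
import Mathlib
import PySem

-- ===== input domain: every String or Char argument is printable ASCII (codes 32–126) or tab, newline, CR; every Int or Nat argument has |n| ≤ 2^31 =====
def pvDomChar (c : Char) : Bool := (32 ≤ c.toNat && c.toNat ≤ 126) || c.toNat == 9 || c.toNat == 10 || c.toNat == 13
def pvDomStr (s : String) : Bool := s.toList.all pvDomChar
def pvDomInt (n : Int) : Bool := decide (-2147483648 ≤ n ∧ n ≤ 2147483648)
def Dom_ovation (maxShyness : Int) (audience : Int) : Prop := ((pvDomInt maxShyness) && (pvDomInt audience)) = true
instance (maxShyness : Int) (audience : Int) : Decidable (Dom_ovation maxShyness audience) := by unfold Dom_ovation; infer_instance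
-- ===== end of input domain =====

-- B replaces A's incrementally maintained friend counter by a three-phase computation
-- (prefix sums, first index exceeding maxShyness, maximum deficit); equal return values
-- proved for audience ≥ 0 (both Pythons raise ValueError on the '-' of a negative audience).

-- ===== PORT A =====
-- int(c) for one character c of str(audience); Python raises ValueError where ofStr? is
-- none (only reachable for audience < 0, excluded by Pre_), the default 0 is never used there.
def pyDigit (c : Char) : Int := (PySem.Int.ofStr? (String.ofList [c])).getD 0

-- [int(i) for i in str(audience)]  (the identical comprehension line appears in both Pythons)
def pyDigits (audience : Int) : List Int := (PySem.Int.toStr audience).toList.map pyDigit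

-- the for-loop of A with its break, state = (shyLevel, audienceOvated, audienceNeeded)
def ovLoopA (maxShyness : Int) : List Int → Int → Int → Int → Int
  | [], _, _, audienceNeeded => audienceNeeded
  | newOvations :: rest, shyLevel, audienceOvated, audienceNeeded =>
    let audienceNeeded' := if audienceOvated + audienceNeeded < shyLevel then audienceNeeded + 1 else audienceNeeded
    let audienceOvated' := audienceOvated + newOvations
    if maxShyness < audienceOvated' then audienceNeeded'
    else ovLoopA maxShyness rest (shyLevel + 1) audienceOvated' audienceNeeded'

def ovation (maxShyness : Int) (audience : Int) : Int :=
  ovLoopA maxShyness (pyDigits audience) 0 0 0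

-- ===== PORT B =====
-- prefixes = [0]; for d in digits: prefixes.append(prefixes[-1] + d)
def prefixesB (digits : List Int) : List Int :=
  digits.foldl (fun ps d => ps ++ [PySem.List.pyGetD ps (-1) 0 + d]) [0]

def ovation_alt (maxShyness : Int) (audience : Int) : Int :=
  let digits := pyDigits audience
  let prefixes := prefixesB digits
  -- next((i for i, p in enumerate(prefixes[1:]) if p > maxShyness), len(digits) - 1)
  let cutoff : Int :=
    match (PySem.List.slice prefixes (some 1) none).findIdx? (fun p => decide (maxShyness < p)) with
    | some i => (i : Int)
    | none => PySem.List.len digits - 1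
  -- max([0] + [i - p for i, p in enumerate(prefixes[:cutoff + 1])])
  (PySem.List.max?
    ((0 : Int) :: (PySem.List.enumerate (PySem.List.slice prefixes none (some (cutoff + 1)))).map
      (fun ip => ip.1 - ip.2)) (fun x => x)).getD 0

-- ===== PRECONDITION & SPEC =====
-- Pre_ excludes audience < 0: there str(audience) starts with '-' and int('-') raises
-- ValueError in BOTH A and B, so neither returns.
def Pre_ovation (maxShyness : Int) (audience : Int) : Prop := 0 ≤ audience
instance (maxShyness : Int) (audience : Int) : Decidable (Pre_ovation maxShyness audience) := by unfold Pre_ovation; infer_instance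
def pvWitness_ovation : Int × Int := (3, 11011)

def Spec_ovation (maxShyness : Int) (audience : Int) (out : Int) : Prop := out = ovation_alt maxShyness audience
instance (maxShyness : Int) (audience : Int) (out : Int) : Decidable (Spec_ovation maxShyness audience out) := by unfold Spec_ovation; infer_instance

-- ===== CLAIM (what is proved, stated in full; the proofs are below) =====
def Claim_equal_ovation : Prop := ∀ (maxShyness : Int) (audience : Int), Dom_ovation maxShyness audience → Pre_ovation maxShyness audience → Spec_ovation maxShyness audience (ovation maxShyness audience)

-- ===== LEMMAS AND PROOFS =====

-- any single character parses (via int) to none or to a digit value, never to a negative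
theorem ofChars_single_nonneg (c : Char) : 0 ≤ (PySem.Int.ofChars? [c]).getD 0 := by
  cases h : PySem.Int.ofChars? [c] with
  | none => simp
  | some k =>
    simp only [Option.getD_some]
    by_cases hm : c = '-'
    · subst hm; simp [show PySem.Int.ofChars? ['-'] = none from by decide] at h
    · unfold PySem.Int.ofChars? at h
      by_cases hc : PySem.Int.isIntSpace c = true
      · simp only [List.dropWhile, hc, List.reverse_nil, List.dropWhile_nil] at h
        simp only [bind_pure_comp, Option.map_eq_some_iff] at h
        obtain ⟨a, ha, rfl⟩ := h
        rw [Option.map_eq_map, Option.map_eq_some_iff] at ha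
        obtain ⟨b, _, rfl⟩ := ha
        exact Int.natCast_nonneg b
      · simp only [List.dropWhile, hc, List.reverse_cons, List.reverse_nil, List.nil_append] at h
        split at h
        · rename_i ds hds; cases hds; exact absurd rfl hm
        · simp only [bind_pure_comp, Option.map_eq_some_iff] at h
          obtain ⟨a, ha, rfl⟩ := h
          rw [Option.map_eq_map, Option.map_eq_some_iff] at ha
          obtain ⟨b, _, rfl⟩ := ha
          exact Int.natCast_nonneg b
        · simp only [bind_pure_comp, Option.map_eq_some_iff] at h
          obtain ⟨a, ha, rfl⟩ := h
          rw [Option.map_eq_map, Option.map_eq_some_iff] at ha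
          obtain ⟨b, _, rfl⟩ := ha
          exact Int.natCast_nonneg b

theorem pyDigit_nonneg (c : Char) : 0 ≤ pyDigit c := by
  have h : PySem.Int.ofStr? (String.ofList [c]) = PySem.Int.ofChars? [c] := by
    rw [PySem.Int.ofStr?]; congr 1; exact String.toList_ofList
  rw [pyDigit, h]
  exact ofChars_single_nonneg c

-- inclusive prefix sums of ds starting from p (head is p itself)
def scan (p : Int) : List Int → List Int
  | [] => [p]
  | d :: ds => p :: scan (p + d) ds

-- the common reference loop: running maximum of the deficit i - p, with A's break
def specLoop (maxShyness : Int) : List Int → Int → Int → Int → Int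
  | [], _, _, best => best
  | d :: rest, i, p, best =>
    let best' := max best (i - p)
    if maxShyness < p + d then best' else specLoop maxShyness rest (i + 1) (p + d) best'

-- A's conditional increment IS the running max, given nonnegative digits
theorem ovLoopA_eq_specLoop (maxShyness : Int) (ds : List Int) (hds : ∀ d ∈ ds, 0 ≤ d) :
    ∀ (i p needed : Int), i - p - 1 ≤ needed →
      ovLoopA maxShyness ds i p needed = specLoop maxShyness ds i p needed := by
  induction ds with
  | nil => intro i p needed _; rfl
  | cons d rest ih =>
    intro i p needed hinv
    have hd : 0 ≤ d := hds d List.mem_cons_self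
    have hrest : ∀ x ∈ rest, 0 ≤ x := fun x hx => hds x (List.mem_cons_of_mem _ hx)
    simp only [ovLoopA, specLoop]
    have hup : (if p + needed < i then needed + 1 else needed) = max needed (i - p) := by
      split_ifs with h <;> omega
    rw [hup]
    split_ifs with hbr
    · rfl
    · exact ih hrest (i + 1) (p + d) (max needed (i - p)) (by omega)

-- the foldl of B's prefix loop builds the scan
theorem prefix_fold_scan (ds : List Int) :
    ∀ (acc : List Int) (p : Int),
      ds.foldl (fun ps d => ps ++ [PySem.List.pyGetD ps (-1) 0 + d]) (acc ++ [p]) =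
        acc ++ scan p ds := by
  induction ds with
  | nil => intro acc p; simp [scan]
  | cons d rest ih =>
    intro acc p
    simp only [List.foldl_cons, PySem.List.pyGetD_neg_one_append_singleton, scan]
    rw [show acc ++ [p] ++ [p + d] = (acc ++ [p]) ++ [p + d] from by simp, ih (acc ++ [p]) (p + d)]
    simp

theorem prefixesB_eq_scan (ds : List Int) : prefixesB ds = scan 0 ds := by
  have := prefix_fold_scan ds [] 0
  simpa [prefixesB] using this

-- number of prefixes the cutoff slice keeps: cutoff + 1
def takeCount (maxShyness p : Int) (ds : List Int) : Nat :=
  match ((scan p ds).drop 1).findIdx? (fun q => decide (maxShyness < q)) with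
  | some k => k + 1
  | none => ds.length

theorem scan_head (p : Int) (ds : List Int) : ∃ t, scan p ds = p :: t := by
  cases ds <;> exact ⟨_, rfl⟩

-- the reference loop computes the fold of max over the deficits of the kept prefixes
theorem specLoop_eq_fold (maxShyness : Int) (ds : List Int) :
    ∀ (i p best : Int),
      specLoop maxShyness ds i p best =
        ((PySem.List.enumerate ((scan p ds).take (takeCount maxShyness p ds)) i).map
          (fun ip => ip.1 - ip.2)).foldl max best := by
  induction ds with
  | nil =>
    intro i p best
    simp [specLoop, takeCount, scan, PySem.List.enumerate_nil]
  | cons d rest ih =>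
    intro i p best
    obtain ⟨t, ht⟩ := scan_head (p + d) rest
    by_cases hbr : maxShyness < p + d
    · have htc : takeCount maxShyness p (d :: rest) = 1 := by
        simp [takeCount, scan, ht, List.findIdx?_cons, hbr]
      simp [specLoop, hbr, htc, scan, PySem.List.enumerate_cons, PySem.List.enumerate_nil]
    · have hdt : (scan (p + d) rest).drop 1 = t := by rw [ht]; rfl
      have htc : takeCount maxShyness p (d :: rest) = takeCount maxShyness (p + d) rest + 1 := by
        simp only [takeCount, scan, List.drop_succ_cons, List.drop_zero, ht,
          List.findIdx?_cons]
        simp only [hbr, decide_false, Bool.false_eq_true, if_false]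
        cases t.findIdx? (fun q => decide (maxShyness < q)) <;> simp
      simp only [specLoop, hbr, if_false, scan, htc, List.take_succ_cons,
        PySem.List.enumerate_cons, List.map_cons, List.foldl_cons]
      exact ih (i + 1) (p + d) (max best (i - p))

-- PySem.List.max? of 0 :: l is the fold of max
theorem max_getD_fold (l : List Int) :
    (PySem.List.max? ((0 : Int) :: l) (fun x => x)).getD 0 = l.foldl max 0 := by
  rw [PySem.List.max?_id_cons]
  rfl

-- ===== VERDICT (by name: the statement is the Claim_ definition above) =====
theorem ovation_spec : Claim_equal_ovation := by
  intro maxShyness audience _ _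
  have hnn : ∀ d ∈ pyDigits audience, 0 ≤ d := by
    intro d hd
    simp only [pyDigits, List.mem_map] at hd
    obtain ⟨c, _, rfl⟩ := hd
    exact pyDigit_nonneg c
  simp only [Spec_ovation, ovation, ovation_alt]
  rw [ovLoopA_eq_specLoop maxShyness (pyDigits audience) hnn 0 0 0 (by omega),
      specLoop_eq_fold maxShyness (pyDigits audience) 0 0 0]
  rw [prefixesB_eq_scan]
  have hslice1 : PySem.List.slice (scan 0 (pyDigits audience)) (some 1) none =
      (scan 0 (pyDigits audience)).drop 1 := by
    rw [PySem.List.slice_from_one, List.drop_one]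
  rw [hslice1]
  cases h : ((scan 0 (pyDigits audience)).drop 1).findIdx? (fun p => decide (maxShyness < p)) with
  | some k =>
    have hcast : ((k : Int) + 1) = (((k + 1 : Nat) : Nat) : Int) := by push_cast; ring
    have htc : takeCount maxShyness 0 (pyDigits audience) = k + 1 := by
      rw [List.drop_one] at h
      simp [takeCount, h]
    rw [hcast, PySem.List.slice_to_natCast, max_getD_fold, htc]
  | none =>
    have hcast : (PySem.List.len (pyDigits audience) - 1 + 1) =
        (((pyDigits audience).length : Nat) : Int) := by
      simp [PySem.List.len_eq]
    have htc : takeCount maxShyness 0 (pyDigits audience) = (pyDigits audience).length := by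
      rw [List.drop_one] at h
      simp [takeCount, h]
    rw [hcast, PySem.List.slice_to_natCast, max_getD_fold, htc]
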